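-- pv_equiv track=rewrite | github.com/AniGerm/IrrigationPro | tools/convert_legacy_setup_to_backup.py | _normalize_weekdays
-- ===== SOURCE A (Python) =====
-- WEEKDAY_MAP = {
--     "monday": "monday",
--     "tuesday": "tuesday",
--     "wednesday": "wednesday",
--     "thursday": "thursday",
--     "friday": "friday",
--     "saturday": "saturday",
--     "sunday": "sunday",
-- }
--
-- def _normalize_weekdays(values: list[str] | None) -> list[str]:
--     out: list[str] = []
--     for item in values or []:
--         day = WEEKDAY_MAP.get(str(item).strip().lower())
--         if day:
--             out.append(day)
--     order = ["monday", "tuesday", "wednesday", "thursday", "friday", "saturday", "sunday"]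
--     unique = sorted(set(out), key=order.index) if out else order
--     return unique
-- ===== SOURCE B (Python) =====
-- _ORDER = ["monday", "tuesday", "wednesday", "thursday", "friday", "saturday", "sunday"]
--
-- def _normalize_weekdays(values: list[str] | None) -> list[str]:
--     found = {str(item).strip().lower() for item in (values or [])}
--     selected = [day for day in _ORDER if day in found]
--     return selected if selected else list(_ORDER)
-- ===== Notes on version B (the rewrite author's own statement) =====
-- stated objective: simpler
-- what changed: Instead of collecting matched days and sorting them by order.index, B builds the set of normalized strings in one pass and walks the canonical weekday list once, keeping the days present in the set (falling back to the full list when none match, as A does).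
import Mathlib
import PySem

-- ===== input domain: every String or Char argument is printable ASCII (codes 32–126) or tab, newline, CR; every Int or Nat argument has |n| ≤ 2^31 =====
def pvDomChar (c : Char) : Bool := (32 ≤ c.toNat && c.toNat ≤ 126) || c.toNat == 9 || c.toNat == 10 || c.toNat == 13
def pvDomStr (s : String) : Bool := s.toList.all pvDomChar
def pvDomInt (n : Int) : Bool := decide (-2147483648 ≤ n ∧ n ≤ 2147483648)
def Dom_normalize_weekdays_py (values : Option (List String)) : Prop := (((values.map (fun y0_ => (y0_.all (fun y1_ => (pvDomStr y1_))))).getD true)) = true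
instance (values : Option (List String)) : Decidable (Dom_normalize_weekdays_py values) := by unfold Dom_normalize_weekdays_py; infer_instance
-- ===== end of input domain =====

-- B replaces A's collect-then-sort-by-order.index with one set of normalized strings and a
-- single walk over the canonical weekday list (same empty-falls-back-to-full-list behaviour); objective: simpler.

-- ===== PORT A =====
def pvWeekdayMap : PySem.Dict String String :=
  PySem.Dict.ofList [("monday","monday"),("tuesday","tuesday"),("wednesday","wednesday"),
    ("thursday","thursday"),("friday","friday"),("saturday","saturday"),("sunday","sunday")]

def normalize_weekdays_py (values : Option (List String)) : List String :=
  let out : List String := (values.getD []).foldl (fun out item =>  -- `for item in values or []`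
    match pvWeekdayMap.get? (PySem.Str.lower (PySem.Str.strip item)) with  -- str(item) is item
    | some day => if day ≠ "" then out ++ [day] else out  -- `if day:` truthiness of Optional[str]
    | none => out) []
  let order : List String := ["monday", "tuesday", "wednesday", "thursday", "friday", "saturday", "sunday"]
  -- key=order.index: every element of set(out) is a value of WEEKDAY_MAP, hence in order,
  -- so index? is always some and the .getD 0 total form is exact
  if out ≠ [] then
    PySem.List.sorted (PySem.Set.ofList out) (fun d => (PySem.List.index? order d).getD 0) false
  else order

-- ===== PORT B =====
def pvOrderB : List String := ["monday", "tuesday", "wednesday", "thursday", "friday", "saturday", "sunday"]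

def normalize_weekdays_py_alt (values : Option (List String)) : List String :=
  let found : PySem.Set String :=
    PySem.Set.ofList ((values.getD []).map (fun item => PySem.Str.lower (PySem.Str.strip item)))
  let selected := pvOrderB.filter (fun day => PySem.Set.contains found day)
  if selected ≠ [] then selected else pvOrderB

-- ===== PRECONDITION & SPEC =====
def Spec_normalize_weekdays_py (values : Option (List String)) (out : List String) : Prop := out = normalize_weekdays_py_alt values
instance (values : Option (List String)) (out : List String) : Decidable (Spec_normalize_weekdays_py values out) := by unfold Spec_normalize_weekdays_py; infer_instance

-- ===== CLAIM (what is proved, stated in full; the proofs are below) =====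
def Claim_equal_normalize_weekdays_py : Prop := ∀ (values : Option (List String)), Dom_normalize_weekdays_py values → Spec_normalize_weekdays_py values (normalize_weekdays_py values)

-- ===== LEMMAS AND PROOFS =====

-- WEEKDAY_MAP.get(n) returns n exactly when n is a weekday name
theorem pvLookup (n : String) :
    pvWeekdayMap.get? n = if n ∈ pvOrderB then some n else none := by
  by_cases h : n ∈ pvOrderB
  · simp only [pvOrderB, List.mem_cons, List.not_mem_nil, or_false] at h
    rcases h with rfl|rfl|rfl|rfl|rfl|rfl|rfl <;> simp [pvWeekdayMap, pvOrderB] <;> decide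
  · rw [if_neg h]
    rw [PySem.Dict.get?_eq_none_iff_not_mem_keys]
    intro hk
    apply h
    have : pvWeekdayMap.keys = pvOrderB := by decide
    rwa [this] at hk

theorem pvStep (out : List String) (item : String) :
    (match pvWeekdayMap.get? (PySem.Str.lower (PySem.Str.strip item)) with
     | some day => if day ≠ "" then out ++ [day] else out
     | none => out) =
    (if decide ((PySem.Str.lower (PySem.Str.strip item)) ∈ pvOrderB) then
      out ++ [PySem.Str.lower (PySem.Str.strip item)] else out) := by
  rw [pvLookup]
  by_cases h : (PySem.Str.lower (PySem.Str.strip item)) ∈ pvOrderB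
  · rw [if_pos h]
    simp only [decide_eq_true h, if_true]
    have hne : PySem.Str.lower (PySem.Str.strip item) ≠ "" := by
      simp only [pvOrderB, List.mem_cons, List.not_mem_nil, or_false] at h
      rcases h with h|h|h|h|h|h|h <;> rw [h] <;> decide
    rw [if_pos hne]
  · rw [if_neg h]
    simp [h]

theorem pvOut_eq (xs acc : List String) :
    xs.foldl (fun out item =>
      match pvWeekdayMap.get? (PySem.Str.lower (PySem.Str.strip item)) with
      | some day => if day ≠ "" then out ++ [day] else out
      | none => out) acc =
    acc ++ (xs.map (fun item => PySem.Str.lower (PySem.Str.strip item))).filter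
      (fun n => decide (n ∈ pvOrderB)) := by
  induction xs generalizing acc with
  | nil => simp
  | cons x t ih =>
    rw [List.foldl_cons, pvStep, List.map_cons, List.filter_cons]
    by_cases h : (PySem.Str.lower (PySem.Str.strip x)) ∈ pvOrderB
    · simp only [h, decide_true, if_true]
      rw [ih]
      simp
    · simp only [h, decide_false, Bool.false_eq_true, if_false]
      exact ih acc

-- the sorted set of matched days IS the canonical list filtered by membership in the normalized set
theorem pvSorted_eq (ns : List String) :
    PySem.List.sorted
      (PySem.Set.ofList (ns.filter (fun n => decide (n ∈ pvOrderB))))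
      (fun d => (PySem.List.index? pvOrderB d).getD 0) false =
    pvOrderB.filter (fun day => PySem.Set.contains (PySem.Set.ofList ns) day) := by
  apply PySem.List.sorted_eq_of_perm_of_pairwise_lt
  · rw [List.perm_ext_iff_of_nodup]
    · intro d
      simp only [List.mem_filter, PySem.Set.mem_ofList, PySem.Set.contains_iff,
        decide_eq_true_eq]
      tauto
    · exact List.Nodup.filter _ (by decide : pvOrderB.Nodup)
    · exact PySem.Set.nodup_ofList _
  · have hord : pvOrderB.Pairwise
        (fun a b => ((PySem.List.index? pvOrderB a).getD 0 : Nat) <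
          (PySem.List.index? pvOrderB b).getD 0) := by decide
    exact List.Pairwise.sublist List.filter_sublist hord

-- ===== VERDICT (by name: the statement is the Claim_ definition above) =====
theorem normalize_weekdays_py_spec : Claim_equal_normalize_weekdays_py := by
  intro values _
  unfold Spec_normalize_weekdays_py normalize_weekdays_py normalize_weekdays_py_alt
  rw [pvOut_eq]
  rw [List.nil_append]
  simp only [show (["monday", "tuesday", "wednesday", "thursday", "friday", "saturday", "sunday"] : List String) = pvOrderB from rfl]
  set ns := (values.getD []).map (fun item => PySem.Str.lower (PySem.Str.strip item)) with hns
  rw [pvSorted_eq ns]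
  set sel := pvOrderB.filter (fun day => PySem.Set.contains (PySem.Set.ofList ns) day) with hsel
  by_cases h : ns.filter (fun n => decide (n ∈ pvOrderB)) = []
  · rw [if_neg (by simp [h])]
    have : sel = [] := by
      rw [hsel, List.filter_eq_nil_iff]
      intro d hd
      simp only [PySem.Set.contains_iff]
      intro hmem
      have : d ∈ ns.filter (fun n => decide (n ∈ pvOrderB)) := by
        rw [List.mem_filter]
        exact ⟨by simpa [PySem.Set.mem_ofList] using hmem, by simpa using hd⟩
      simp [h] at this
    rw [this, if_neg (by simp)]
  · rw [if_pos (by simpa using h)]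
    have : sel ≠ [] := by
      rw [hsel]
      obtain ⟨d, hd⟩ := List.exists_mem_of_ne_nil _ h
      rw [List.mem_filter] at hd
      intro hnil
      rw [List.filter_eq_nil_iff] at hnil
      have hc := hnil d (by simpa using hd.2)
      simp [PySem.Set.mem_ofList, hd.1] at hc
    rw [if_pos (by simpa using this)]
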